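/- GENERATED by tools/from_farm_form.py from prooffarm-gif/accepted/prog_main.1/Lemmas.lean (a worked proof of the farm's unit `prog_main.1`,
   accepted by the verdict) — do not edit. -/
import Gif.Spec.Units.prog_main_1
import Gif.Spec.AllSegs

/-!
  Lemmas for the unit `prog_main.1` (the BODY of the driver's top function, a protected frame at HEAP level: `Core` carries no forest
  and no reader; `Body` adds `HeapInv H … (framesIn frames e)`; THERE IS NO `Env`). Two contract calls; the first one's return address
  0x105057 (`ret1`) becomes a private cut. THE MODEL OF A HEAP-LEVEL BODY SEGMENT (with farm.gif/worked/gif_decode.2; the recipe: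
  farm.gif/hints/driver.md).

      pm1_AtRet1       the assertion at `ret1`: `Core` + `rbp = out`, `r12 = cap` + the heap `H'` gif_decode left, with its invariant
      pm1_seg_call     0x105042 … `call gif_decode` … 0x105057 (`pm1_AtRet1`), or `len < 0`: … 0x105082 (`Done`)
      pm1_seg_tail     0x105057 … 0x105082 (`Done`): `cap < 64`, or `call memcpy` (contract instantiated at `H'`), `eax = 64`

  THE TREE'S LEMMAS IT USES (nothing general is proved here):
      word_msb_false, word_sgt_lit     the two SIGNED 64-bit branch facts (`test rsi, rsi ; js`, `cmp r12, 63 ; jg`)        Words.lean §5e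
      HeapPre.at_call                  `HeapPre` at a callee's entry from `Body.inv` and ONE stack window                    FrameCarry.lean §5
      LiveIn.of_rest, .rest_offStack   the output of the pre as memcpy's destination; it is off the stack region            Carry.lean §4
      prog_main.Core.carry, .carry_eq  `Core` behind a callee and at every exit, from a footprint of `prog_main.BodyWin`s    DriverCarry.lean §2

  WHAT CARRIES `slot_ra` AND THE SAVED-REGISTER SLOTS THROUGH A CALLEE: `Core.carry`. Behind the call, `hsame1 : Mem.SameExcept […]
  v.mem s_<addr>r.mem := by u_same` (the pushed return address and the callee's footprint, from the state the walk started at), each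
  window a `BodyWin`. gif_decode's footprint is its stack (below the body's `rsp`), `[800000H, 1000020H)` and the own `report`
  (RA − 136 … RA − 72): two windows. memcpy's is 80 bytes of stack and the output, which is off the stack region
  (`LiveIn.rest_offStack`, a DISJUNCTION in the context: `u_same` / `omega` split it by themselves).
-/

open X86 X86.User Asan ProgX.Base ProgX.Base.Spec Gif.Spec

set_option maxRecDepth 4000
set_option maxHeartbeats 4000000

namespace Gif.Spec.prog_main_1

/-- **At 105057H (ret1), `gif_decode(in, len, &report)` has returned**: `Core`; `rbp = out` and `r12 = cap` (callee-saved copies made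
at 105047H / 10504AH, read by `cmp r12, 63` and `mov rdi, rbp`); A heap `H'` at the place of `H` with its invariant, the own frame
active, the clean stack ending at the body's `rsp` (what `memcpy`'s `ShadowPre` is made of). -/
structure pm1_AtRet1 (H : Heap) (rest : List Obj) (frames : List (Nat × FrameLayout)) (u₀ e : State)
    (ret : Word) (v : State) : Prop where
  core : prog_main.Core Gif.L.prog_main.ret1 H rest frames u₀ e ret v
  rbp : v.reg .rbp = e.reg .rdx
  r12 : v.reg .r12 = e.reg .rcx
  heap : ∃ H', SameRegion H H' ∧ HeapInv H' rest (prog_main.framesIn frames e) ((e.reg .rsp).toNat - 168) v.mem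

/-- **105042H … the call of gif_decode … 105057H (ret1); or `len < 0`: 10507DH … 105082H** (gif_driver.c:250-253). `test rsi, rsi ; js`:
taken with the sign bit set: `eax = 0`, `Done` (nothing stored). Otherwise `rsi < 2 ^ 63` (`word_msb_false`), `rbp = out`, `r12 = cap`,
`rdx = rsp + 0x20 = RA − 136 = &report`. gif_decode's precondition: `HeapPre` by `HeapPre.at_call` from `Body.inv` over the pushed
return address; `GlobalsIn`; `Consts` over the same stack window; the input clause of the pre; the report `prog_main.reportLive`,
inside the stack region. Behind the call `Core` by `Core.carry`. -/
theorem pm1_seg_call (Lay : Layout) (hLay : Lay.hi = 0x1000000) (μ : Microarch) (hμ : UserX.MicroOK μ) (u₀ : State)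
    (hcode : HasCodeNat Lay u₀ Gif.L.prog_main.entry Gif.Code.code_prog_main.nat Gif.L.prog_main.size)
    (H : Heap) (rest : List Obj) (frames : List (Nat × FrameLayout)) (e : State) (ret : Word)
    (h_gif_decode : Calls Lay μ ProgX.Base.WayInv (ProgX.Base.conv u₀) Gif.L.gif_decode.entry
      (Gif.Spec.gif_decode.spec H rest (prog_main.framesIn frames e)))
    (v : State) (hat : prog_main.Body H rest frames u₀ e ret v) :
    ReachVia Lay μ ProgX.Base.WayInv v
      (fun s => pm1_AtRet1 H rest frames u₀ e ret s ∨ prog_main.Done H rest frames u₀ e ret s) := by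
  -- 1. THE PRELUDE OF A HEAP-LEVEL BODY SEGMENT: `Core` stays whole (fields by projection), only its `pre` is taken apart
  obtain ⟨hcore, c_rdi, c_rsi, c_rdx, c_rcx, hinv, hconsts⟩ := hat
  have he := hcore.entry
  v_entry he
  obtain ⟨hheap, hglob, hconsts0, hin, hout⟩ := hcore.pre
  have w_rip := hcore.rip
  have c_rsp : v.reg .rsp = e.reg .rsp - 168 := hcore.rsp
  have w_kept : RegsKept [.rsp] v v := RegsKept.refl _ _
  have w_eq : Mem.EqOn ProgX.Base.L.textLo ProgX.Base.L.textHi u₀.mem v.mem := ProgX.Base.conv_code_eqOn hcore.code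
  have hdf := (show abiInv _ from hcore.abi).1
  have hmx := (show abiInv _ from hcore.abi).2
  have hsse := ProgX.Base.sseOK_of_abiInv hcore.abi
  -- 2. THE WALK, to the call's return address (a private cut) and to the segment's exit cut
  u_walk hcode [hμ.vendor] until [Gif.L.prog_main.ret1, Gif.L.prog_main.at_105082] span [ProgX.Base.L.textLo, ProgX.Base.L.textHi] side (v_side)
  case call_inv =>
    v_inv
  case pre_105052 =>
    -- 3. GIF_DECODE'S PRECONDITION
    -- one stack store since `v`: the pushed return address
    have hs : Mem.SameExcept [⟨(e.reg .rsp).toNat - 1168, (e.reg .rsp).toNat - 168⟩] v.mem s_105052.mem := by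
      rw [w_mem]
      u_same
    have hpre' : HeapPre H rest (prog_main.framesIn frames e) s_105052 := by
      refine HeapPre.at_call hheap (SameRegion.refl H) hinv hs (by omega) ?_ ?_ ?_
      · rw [w_rsp]
        u_omega
      · rw [w_rsp]
        u_omega
      · rw [w_rsp]
        u_omega
    -- the constants: the same footprint
    have hconsts' : Consts s_105052.mem := by
      apply hconsts.sameExcept hs
      intro w hw
      have hw_eq := List.mem_singleton.mp hw
      rw [hw_eq]
      right
      show 0x14139a ≤ (e.reg .rsp).toNat - 1168
      omega
    -- the input: `len` is not negative
    have hlen : (e.reg .rsi).toNat < 2 ^ 63 := word_msb_false hbr_105045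
    have hin' := hin hlen
    refine ⟨hpre', hglob, hconsts', ?_, ?_, ?_, ?_⟩
    · rw [w_kept.get .rsi rfl, w_kept.get .rdi rfl, c_rsi, c_rdi]
      exact hin'
    · rw [w_rdx]
      apply prog_main.reportLive rest frames e (by omega) H
      · u_omega
      · u_omega
    · rw [w_rdx]
      u_omega
    · rw [w_rdx]
      u_omega
  · -- 4a. 0x105082 FROM 0x10507d: `len < 0`, eax = 0, NOTHING WAS STORED
    have habi : (conv u₀).inv s_10507d := by
      refine ProgX.Base.abiInv_of ?_ ?_
      · rw [w_flags]
        simp only [X86.User.df_setStatus]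
        exact hdf
      · rw [w_mxcsr]
        exact hmx
    have hcore' := hcore.carry_eq (cut' := Gif.L.prog_main.at_105082) w_rip w_rsp (w_kept.get .rbx rfl) (w_kept.get .r14 rfl)
      (w_kept.get .r15 rfl) w_mem (ProgX.Base.conv_code_in w_eq) habi
    exact ReachVia.done (Or.inr ⟨hcore'⟩)
  · -- 4b. 0x105057 (ret1): GIF_DECODE HAS RETURNED, with A heap `H'` and its invariant at the body's stack pointer
    obtain ⟨H', hreg, hinv1, _⟩ := w_post
    have e_top : (s_105052.reg .rsp).toNat + 8 = (e.reg .rsp).toNat - 168 := by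
      rw [w_rsp_105052]
      u_omega
    rw [e_top] at hinv1
    v_after_call w_rsp_105052 w_mem_105052
    simp only [w_rdx_105052] at w_same
    -- the footprint since `v`: the pushed return address and gif_decode's stack (below the body's `rsp`), the own `report`
    -- (RA − 136 … RA − 72); the heap's region and shadow
    have hsame1 : Mem.SameExcept
        [⟨(e.reg .rsp).toNat - 1168, (e.reg .rsp).toNat - 72⟩,
         ⟨0x800000, 0x1000020⟩] v.mem s_105052r.mem := by u_same
    have hwin1 : ∀ x, x ∈ ([⟨(e.reg .rsp).toNat - 1168, (e.reg .rsp).toNat - 72⟩, ⟨0x800000, 0x1000020⟩] : List Span) →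
        prog_main.BodyWin e x := by
      intro x hx
      simp only [List.mem_cons, List.mem_nil_iff, or_false] at hx
      unfold prog_main.BodyWin
      rcases hx with rfl | rfl
      · left
        simp only
        omega
      · right
        left
        simp only
        omega
    -- `Core` at the returned state: the saved registers and the return address are met by no window
    have hcore1 := hcore.carry (cut' := Gif.L.prog_main.ret1) w_rip w_rsp (w_kept.get .rbx rfl) (w_kept.get .r14 rfl)
      (w_kept.get .r15 rfl) hsame1 hwin1 w_code w_inv
    refine ReachVia.done (Or.inl ?_)
    exact {
      core := hcore1
      rbp := w_rbp
      r12 := w_r12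
      heap := ⟨H', hreg, hinv1⟩
    }

/-- **105057H (ret1) … 105082H** (gif_driver.c:254-258). `cmp r12, 63 ; jg` (signed): not taken: `eax = 0`, `Done` (nothing stored).
Taken: `64 ≤ cap < 2 ^ 63` (`word_sgt_lit`), so the pre gives the output's 64 live bytes in an object of `rest`;
`memcpy(out, &report, 64)` with the contract instantiated at `H'.liveObjs ++ rest` (the heap gif_decode left: the instantiation
happens HERE, after the `obtain` that names `H'`): `ShadowPre` from `HeapPre H'` (`HeapPre.at_call` with `hreg`) over the pushed
return address; source `reportLive` for `H'`; destination `LiveIn.of_rest`; no harmful overlap: the output is off the stack region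
(`LiveIn.rest_offStack`), the report inside it. Then `eax = 64`, `Done`. -/
theorem pm1_seg_tail (Lay : Layout) (hLay : Lay.hi = 0x1000000) (μ : Microarch) (hμ : UserX.MicroOK μ) (u₀ : State)
    (hcode : HasCodeNat Lay u₀ Gif.L.prog_main.entry Gif.Code.code_prog_main.nat Gif.L.prog_main.size)
    (H : Heap) (rest : List Obj) (frames : List (Nat × FrameLayout)) (e : State) (ret : Word)
    (h_memcpy : ∀ (others : List Obj) (frames : List (Nat × FrameLayout)), Calls Lay μ ProgX.Base.WayInv (ProgX.Base.conv u₀)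
      ProgX.Base.L.memcpy.entry (ProgX.Base.Spec.memcpy.spec others frames))
    (v : State) (hat : pm1_AtRet1 H rest frames u₀ e ret v) :
    ReachVia Lay μ ProgX.Base.WayInv v (prog_main.Done H rest frames u₀ e ret) := by
  -- 1. THE PRELUDE; memcpy's contract for the heap of THIS state
  obtain ⟨hcore, c_rbp, c_r12, H', hreg, hinv⟩ := hat
  have he := hcore.entry
  v_entry he
  obtain ⟨hheap, hglob, hconsts0, hin, hout⟩ := hcore.pre
  have hmc := h_memcpy (H'.liveObjs ++ rest) (prog_main.framesIn frames e)
  have w_rip := hcore.rip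
  have c_rsp : v.reg .rsp = e.reg .rsp - 168 := hcore.rsp
  have w_kept : RegsKept [.rsp] v v := RegsKept.refl _ _
  have w_eq : Mem.EqOn ProgX.Base.L.textLo ProgX.Base.L.textHi u₀.mem v.mem := ProgX.Base.conv_code_eqOn hcore.code
  have hdf := (show abiInv _ from hcore.abi).1
  have hmx := (show abiInv _ from hcore.abi).2
  have hsse := ProgX.Base.sseOK_of_abiInv hcore.abi
  -- 2. THE WALK
  u_walk hcode [hμ.vendor] until [Gif.L.prog_main.at_105082] span [ProgX.Base.L.textLo, ProgX.Base.L.textHi] side (v_side)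
  case call_inv =>
    v_inv
  case pre_105071 =>
    -- 3. MEMCPY'S PRECONDITION, for the heap `H'` gif_decode left
    have hcap := word_sgt_lit 63 (by decide) hbr_10505b
    have hlive := hout (by omega) hcap.2
    have hs : Mem.SameExcept [⟨(e.reg .rsp).toNat - 1168, (e.reg .rsp).toNat - 168⟩] v.mem s_105071.mem := by
      rw [w_mem]
      u_same
    have hpre' : HeapPre H' rest (prog_main.framesIn frames e) s_105071 := by
      refine HeapPre.at_call hheap hreg hinv hs (by omega) ?_ ?_ ?_
      · rw [w_rsp]
        u_omega
      · rw [w_rsp]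
        u_omega
      · rw [w_rsp]
        u_omega
    have hoff := hlive.rest_offStack hinv
    have e64 : (Word.ofBV 64#32).toNat = 64 := by decide
    refine ⟨hpre'.shadowPre, Or.inr ⟨?_, ?_, ?_⟩⟩
    · -- the source: the own `report`
      rw [w_rsi, w_rdx]
      apply prog_main.reportLive rest frames e (by omega) H'
      · u_omega
      · rw [e64]
        u_omega
    · -- the destination: the output
      rw [w_rdi, w_rdx]
      exact hlive.of_rest H' _
    · -- no harmful overlap: the output is off the stack region, the report inside it
      rw [w_rdi, w_rsi, w_rdx, e64]
      u_omega
  · -- 4a. 0x105076 (ret2): MEMCPY HAS RETURNED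
    have hcap := word_sgt_lit 63 (by decide) hbr_10505b
    have hlive := hout (by omega) hcap.2
    have hoff := hlive.rest_offStack hinv
    have e64 : (Word.ofBV 64#32).toNat = 64 := by decide
    v_after_call w_rsp_105071 w_mem_105071
    simp only [w_rdi_105071, w_rdx_105071, e64] at w_same
    -- the footprint since `v`: the pushed return address and memcpy's 80 bytes of stack (below the body's `rsp`); the output
    have hsame1 : Mem.SameExcept
        [⟨(e.reg .rsp).toNat - 1168, (e.reg .rsp).toNat - 168⟩,
         ⟨(e.reg .rdx).toNat, (e.reg .rdx).toNat + 64⟩] v.mem s_105071r.mem := by u_same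
    have hwin1 : ∀ x, x ∈ ([⟨(e.reg .rsp).toNat - 1168, (e.reg .rsp).toNat - 168⟩,
        ⟨(e.reg .rdx).toNat, (e.reg .rdx).toNat + 64⟩] : List Span) → prog_main.BodyWin e x := by
      intro x hx
      simp only [List.mem_cons, List.mem_nil_iff, or_false] at hx
      unfold prog_main.BodyWin
      rcases hx with rfl | rfl
      · left
        simp only
        omega
      · -- the output is off the stack region: `hoff`
        right
        right
        simp only
        omega
    clear hoff hlive hcap w_same w_post
    -- 0x105076 … 0x105082: `mov eax, 64 ; jmp` (`w_kept` stays relative to `v`)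
    u_walk hcode [hμ.vendor] until [Gif.L.prog_main.at_105082] span [ProgX.Base.L.textLo, ProgX.Base.L.textHi] side (v_side)
    have hsame2 : Mem.SameExcept
        [⟨(e.reg .rsp).toNat - 1168, (e.reg .rsp).toNat - 168⟩,
         ⟨(e.reg .rdx).toNat, (e.reg .rdx).toNat + 64⟩] v.mem s_10507b.mem := by
      rw [w_mem]
      exact hsame1
    have habi : (conv u₀).inv s_10507b := by
      refine ProgX.Base.abiInv_of ?_ ?_
      · rw [w_flags]
        exact w_df
      · rw [w_mxcsr]
        exact w_mx
    have hcore' := hcore.carry (cut' := Gif.L.prog_main.at_105082) w_rip w_rsp (w_kept.get .rbx rfl) (w_kept.get .r14 rfl)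
      (w_kept.get .r15 rfl) hsame2 hwin1 (ProgX.Base.conv_code_in w_eq) habi
    exact ReachVia.done ⟨hcore'⟩
  · -- 4b. 0x105082 FROM 0x105062: `cap < 64` (or negative), eax = 0, NOTHING WAS STORED
    have habi : (conv u₀).inv s_105062 := by
      refine ProgX.Base.abiInv_of ?_ ?_
      · rw [w_flags]
        simp only [X86.User.df_setStatus]
        exact hdf
      · rw [w_mxcsr]
        exact hmx
    have hcore' := hcore.carry_eq (cut' := Gif.L.prog_main.at_105082) w_rip w_rsp (w_kept.get .rbx rfl) (w_kept.get .r14 rfl)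
      (w_kept.get .r15 rfl) w_mem (ProgX.Base.conv_code_in w_eq) habi
    exact ReachVia.done ⟨hcore'⟩

end Gif.Spec.prog_main_1
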